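-- pv_equiv track=rewrite | github.com/NekoYellow/cs-learning | cs61a/misc/Arrakis.py | thumper
-- ===== SOURCE A (Python) =====
-- def thumper(k, m):
--     """Yield all k-digit worms with digits that are at most m, in increasing order.
--
--     >>> list(thumper(1, 7)) # 0 has 0 digit
--     [1, 2, 3, 4, 5, 6, 7]
--     >>> list(thumper(2, 3))
--     [10, 12, 21, 23, 32]
--     """
--     if k == 1:
--         yield from range(1, m+1)
--     else:
--         for w in thumper(k-1, m):
--             if w % 10 > 0:
--                 yield 10*w + (w%10 - 1)
--             if w % 10 < m:
--                 yield 10*w + (w%10 + 1)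
-- ===== SOURCE B (Python) =====
-- def thumper(k, m):
--     """Yield all k-digit worms with digits at most m, in increasing order.
--
--     Depth-first build: each worm is grown digit-by-digit from its leading
--     digit, recursing on the smaller last digit first.
--     """
--     def helper(cur, length):
--         if length == k:
--             yield cur
--             return
--         last = cur % 10
--         if last > 0:
--             yield from helper(10 * cur + last - 1, length + 1)
--         if last < m:
--             yield from helper(10 * cur + last + 1, length + 1)
--     for d in range(1, m + 1):
--         yield from helper(d, 1)
-- ===== Notes on version B (the rewrite author's own statement) =====
-- stated objective: alternative
-- what changed: Replaces A's level-by-level generation (recompute all (k-1)-digit worms, then extend each by one digit) with a per-worm depth-first build: an inner helper grows one worm digit-by-digit from each leading digit 1..m, recursing into last-1 before last+1. Pre_ requires 1 <= k <= 997: for k <= 0 A never reaches its base case and raises RecursionError, and for k >= 998 A's depth-k generator recursion exceeds CPython's default recursion limit of 1000, so A raises RecursionError there too (B, also depth-k recursive, raises likewise).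
import Mathlib
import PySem

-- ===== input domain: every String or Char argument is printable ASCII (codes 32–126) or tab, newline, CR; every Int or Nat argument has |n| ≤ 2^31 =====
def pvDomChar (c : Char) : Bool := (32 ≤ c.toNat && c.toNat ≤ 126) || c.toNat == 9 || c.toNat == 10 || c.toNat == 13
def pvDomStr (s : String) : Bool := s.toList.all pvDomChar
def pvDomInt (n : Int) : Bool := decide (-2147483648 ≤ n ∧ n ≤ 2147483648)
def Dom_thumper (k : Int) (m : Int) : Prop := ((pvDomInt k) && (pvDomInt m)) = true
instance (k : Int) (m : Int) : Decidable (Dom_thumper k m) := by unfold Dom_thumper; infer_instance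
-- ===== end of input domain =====

-- B is an alternative of the same cost: a depth-first per-worm build instead of A's
-- level-by-level extension; proved to yield the identical list.

-- ===== PORT A =====
-- A's loop body: the (up to two) worms yielded for a (k-1)-digit worm w, in yield order.
def thumperStep (m : Int) (w : Int) : List Int :=
  (if w % 10 > 0 then [10*w + (w % 10 - 1)] else []) ++
  (if w % 10 < m then [10*w + (w % 10 + 1)] else [])

-- A's recursion on k (fuel = k; k ≤ 0 diverges in Python and is excluded by Pre_).
def thumperAux (m : Int) : Nat → List Int
  | 0 => []
  | 1 => PySem.List.pyRange 1 (m+1) 1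
  | (n+2) => (thumperAux m (n+1)).flatMap (fun w => thumperStep m w)

def thumper (k : Int) (m : Int) : List Int := thumperAux m k.toNat

-- ===== PORT B =====
-- B's inner helper: grow the worm `cur`; fuel = k - length (0 means length == k: yield cur).
def helperAux (m : Int) (cur : Int) : Nat → List Int
  | 0 => [cur]
  | (n+1) =>
      let last := cur % 10
      (if last > 0 then helperAux m (10*cur + (last - 1)) n else []) ++
      (if last < m then helperAux m (10*cur + (last + 1)) n else [])

def thumper_alt (k : Int) (m : Int) : List Int :=
  (PySem.List.pyRange 1 (m+1) 1).flatMap (fun d => helperAux m d (k-1).toNat)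

-- ===== PRECONDITION & SPEC =====
-- Pre_ excludes exactly the inputs on which the Python A raises: for k ≤ 0 A's
-- recursion on k-1 never reaches its k == 1 base case (RecursionError), and for
-- k ≥ 998 A's depth-k chain of recursive generators exceeds CPython's default
-- recursion limit of 1000, so A raises RecursionError there as well (the cutoff
-- ≈998 is measured at top level; B's depth-k recursion raises there likewise).
def Pre_thumper (k : Int) (m : Int) : Prop := 1 ≤ k ∧ k ≤ 997
instance (k : Int) (m : Int) : Decidable (Pre_thumper k m) := by unfold Pre_thumper; infer_instance
def pvWitness_thumper : Int × Int := (2, 3)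
def Spec_thumper (k : Int) (m : Int) (out : List Int) : Prop := out = thumper_alt k m
instance (k : Int) (m : Int) (out : List Int) : Decidable (Spec_thumper k m out) := by unfold Spec_thumper; infer_instance

-- ===== CLAIM (what is proved, stated in full; the proofs are below) =====
def Claim_equal_thumper : Prop := ∀ (k : Int) (m : Int), Dom_thumper k m → Pre_thumper k m → Spec_thumper k m (thumper k m)

-- ===== LEMMAS AND PROOFS =====

-- One DFS level unfolds into A's step followed by shallower DFS.
theorem helperAux_succ (m cur : Int) (n : Nat) :
    helperAux m cur (n+1) = (thumperStep m cur).flatMap (fun w => helperAux m w n) := by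
  simp only [helperAux, thumperStep]
  by_cases h1 : cur % 10 > 0 <;> by_cases h2 : cur % 10 < m <;>
    simp [h1, h2, List.flatMap]

-- DFS to depth n+1 = DFS to depth n, then one extension step at each leaf.
theorem helperAux_step_last (m : Int) (n : Nat) : ∀ cur : Int,
    helperAux m cur (n+1) = (helperAux m cur n).flatMap (fun w => thumperStep m w) := by
  induction n with
  | zero => intro cur; simp [helperAux, thumperStep, List.flatMap]
  | succ n ih =>
      intro cur
      rw [helperAux_succ, helperAux_succ]
      simp only [List.flatMap_assoc]
      exact List.flatMap_congr (fun w _ => ih w)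

-- A's level n+1 is the flatMap of B's DFS to depth n over the starting digits.
theorem thumperAux_eq (m : Int) : ∀ n : Nat,
    thumperAux m (n+1) = (PySem.List.pyRange 1 (m+1) 1).flatMap (fun d => helperAux m d n) := by
  intro n
  induction n with
  | zero => simp [thumperAux, helperAux]
  | succ n ih =>
      show thumperAux m (n+2) = _
      rw [thumperAux, ih]
      rw [List.flatMap_assoc]
      exact (List.flatMap_congr (fun d _ => (helperAux_step_last m n d).symm))

-- ===== VERDICT (by name: the statement is the Claim_ definition above) =====
theorem thumper_spec : Claim_equal_thumper := by
  intro k m _ hk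
  have hk1 : (1:Int) ≤ k := hk.1
  unfold Spec_thumper thumper thumper_alt
  obtain ⟨n, hn⟩ : ∃ n : Nat, k.toNat = n + 1 :=
    ⟨(k-1).toNat, by omega⟩
  rw [hn, thumperAux_eq]
  congr 1
  funext d
  congr 1
  omega
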